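-- pv_equiv track=rewrite | github.com/A-alturki/tueki-Islamic-eval | IslamicEval-BurhanAI-Public/task_abc_RAG/evaluation.py | build_char_labels
-- ===== SOURCE A (Python) =====
-- from typing import Dict, List, Optional, Tuple
--
-- def build_char_labels(length: int, spans: List[Tuple[int, int, str]]) -> List[int]:
--     # 0 Neither, 1 Ayah, 2 Hadith
--     arr = [0] * max(0, length)
--     for s, e, t in spans:
--         if s is None or e is None:
--             continue
--         s = max(0, s)
--         e = min(length, e)
--         if e <= s:
--             continue
--         code = 1 if t == "Ayah" else 2 if t == "Hadith" else 0
--         if code == 0: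
--             continue
--         for i in range(s, e):
--             arr[i] = code
--     return arr
-- ===== SOURCE B (Python) =====
-- def build_char_labels(length, spans):
--     # per-position scan of the spans in reverse: the value at i is the code of
--     # the LAST span covering i whose type is Ayah or Hadith (else 0)
--     rev = list(reversed(spans))
--     def label(i):
--         for s, e, t in rev:
--             if s is None or e is None:
--                 continue
--             if s <= i < e:
--                 if t == "Ayah":
--                     return 1
--                 if t == "Hadith":
--                     return 2
--         return 0
--     return [label(i) for i in range(max(0, length))]
-- ===== Notes on version B (the rewrite author's own statement) =====
-- stated objective: alternative
-- what changed: A allocates an array and paints every span's range over it (last write wins); B never mutates: for each position it scans the spans in reverse and returns the code of the last labelled span covering it.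
import Mathlib
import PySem

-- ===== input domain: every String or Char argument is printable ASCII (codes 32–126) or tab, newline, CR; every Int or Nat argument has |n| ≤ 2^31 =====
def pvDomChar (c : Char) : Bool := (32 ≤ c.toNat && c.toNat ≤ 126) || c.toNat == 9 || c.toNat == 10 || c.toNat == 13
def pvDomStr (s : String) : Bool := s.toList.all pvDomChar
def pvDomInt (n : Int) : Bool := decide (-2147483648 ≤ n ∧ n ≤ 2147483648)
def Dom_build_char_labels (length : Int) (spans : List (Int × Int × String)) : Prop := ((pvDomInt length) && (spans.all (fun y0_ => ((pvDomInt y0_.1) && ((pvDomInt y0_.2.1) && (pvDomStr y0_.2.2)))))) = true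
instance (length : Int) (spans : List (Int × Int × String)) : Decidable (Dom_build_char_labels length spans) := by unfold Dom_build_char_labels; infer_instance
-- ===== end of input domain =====

-- B replaces A's in-place range painting by a pure per-position reverse scan of the
-- spans (an alternative decomposition of the same task; not claimed faster).

-- ===== PORT A =====
-- inner loop 'for i in range(s, e): arr[i] = code' (s ≥ 0 and e ≤ len(arr) hold at every call)
def pvPaint (arr : List Int) (s e code : Int) : List Int :=
  (PySem.List.pyRange s e 1).foldl (fun a i => a.set i.toNat code) arr

-- one iteration of A's 'for s, e, t in spans' loop (the 'is None' guard is vacuous: ints are never None)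
def pvStepA (length : Int) (arr : List Int) (sp : Int × Int × String) : List Int :=
  let s := max 0 sp.1
  let e := min length sp.2.1
  if e ≤ s then arr
  else
    let code : Int := if sp.2.2 = "Ayah" then 1 else if sp.2.2 = "Hadith" then 2 else 0
    if code = 0 then arr else pvPaint arr s e code

def build_char_labels (length : Int) (spans : List (Int × Int × String)) : List Int :=
  spans.foldl (pvStepA length) (List.replicate (max 0 length).toNat 0)

-- ===== PORT B =====
-- B's helper 'label(i)': scan the reversed spans, return at the first labelled span covering i
def pvLabel (i : Int) : List (Int × Int × String) → Int
  | [] => 0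
  | (s, e, t) :: rest =>
    if s ≤ i ∧ i < e then
      if t = "Ayah" then 1 else if t = "Hadith" then 2 else pvLabel i rest
    else pvLabel i rest

def build_char_labels_alt (length : Int) (spans : List (Int × Int × String)) : List Int :=
  (PySem.List.pyRange 0 (max 0 length) 1).map (fun i => pvLabel i spans.reverse)

-- ===== PRECONDITION & SPEC =====
def Spec_build_char_labels (length : Int) (spans : List (Int × Int × String)) (out : List Int) : Prop := out = build_char_labels_alt length spans
instance (length : Int) (spans : List (Int × Int × String)) (out : List Int) : Decidable (Spec_build_char_labels length spans out) := by unfold Spec_build_char_labels; infer_instance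

-- ===== CLAIM (what is proved, stated in full; the proofs are below) =====
def Claim_equal_build_char_labels : Prop := ∀ (length : Int) (spans : List (Int × Int × String)), Dom_build_char_labels length spans → Spec_build_char_labels length spans (build_char_labels length spans)

-- ===== LEMMAS AND PROOFS =====

theorem pvPaint_length (arr : List Int) (s e code : Int) :
    (pvPaint arr s e code).length = arr.length := by
  unfold pvPaint
  generalize PySem.List.pyRange s e 1 = l
  induction l generalizing arr with
  | nil => rfl
  | cons x xs ih => simpa [List.foldl] using (ih (arr.set x.toNat code)).trans (by simp)

theorem pvStepA_length (length : Int) (arr : List Int) (sp : Int × Int × String) :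
    (pvStepA length arr sp).length = arr.length := by
  unfold pvStepA
  by_cases h1 : min length sp.2.1 ≤ max 0 sp.1
  · simp [h1]
  · simp only [if_neg h1]
    split_ifs <;> first | rfl | exact pvPaint_length ..

theorem foldl_stepA_length (length : Int) (spans : List (Int × Int × String)) (arr : List Int) :
    (spans.foldl (pvStepA length) arr).length = arr.length := by
  induction spans generalizing arr with
  | nil => rfl
  | cons sp sps ih => simpa [List.foldl] using (ih (pvStepA length arr sp)).trans (pvStepA_length ..)

theorem pvPaint_getElem? (s e code : Int) (hs : 0 ≤ s) (arr : List Int) (k : Nat) :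
    (pvPaint arr s e code)[k]? =
      if s ≤ (k : Int) ∧ (k : Int) < e then
        (if k < arr.length then some code else none)
      else arr[k]? := by
  by_cases hse : e ≤ s
  · rw [pvPaint, PySem.List.pyRange_one_eq_nil hse]
    have : ¬ (s ≤ (k : Int) ∧ (k : Int) < e) := by omega
    simp [this]
  · rw [not_le] at hse
    have hlt : (e - (s + 1)).toNat < (e - s).toNat := by omega
    rw [pvPaint, PySem.List.pyRange_one_cons hse, List.foldl_cons]
    rw [show (List.foldl (fun a i => a.set i.toNat code) (arr.set s.toNat code)
          (PySem.List.pyRange (s+1) e 1)) = pvPaint (arr.set s.toNat code) (s+1) e code from rfl]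
    rw [pvPaint_getElem? (s+1) e code (by omega) (arr.set s.toNat code) k]
    by_cases hk : (k : Int) = s
    · have h1 : ¬ (s + 1 ≤ (k : Int) ∧ (k : Int) < e) := by omega
      have h2 : s ≤ (k : Int) := by omega
      have hks : s.toNat = k := by omega
      by_cases hke : (k : Int) < e
      · simp [h2, hke, hks, List.getElem?_set_self']
        split_ifs <;> simp_all
      · have : ¬ ((k:Int) < e) := hke
        omega
    · have hkn : s.toNat ≠ k := by omega
      have hiff : (s + 1 ≤ (k : Int) ∧ (k : Int) < e) ↔ (s ≤ (k : Int) ∧ (k : Int) < e) := by omega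
      simp only [hiff]
      simp [List.getElem?_set_ne hkn]
termination_by (e - s).toNat

-- the code A assigns to a span's type
def pvCode (t : String) : Int := if t = "Ayah" then 1 else if t = "Hadith" then 2 else 0

theorem pvStepA_getElem? (length : Int) (arr : List Int) (sp : Int × Int × String) (k : Nat)
    (hN : arr.length = (max 0 length).toNat) (hk : k < arr.length) :
    (pvStepA length arr sp)[k]? =
      if (sp.1 ≤ (k : Int) ∧ (k : Int) < sp.2.1) ∧ pvCode sp.2.2 ≠ 0 then some (pvCode sp.2.2)
      else arr[k]? := by
  have hkl : (k : Int) < length := by omega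
  unfold pvStepA
  by_cases h1 : min length sp.2.1 ≤ max 0 sp.1
  · have : ¬ (sp.1 ≤ (k : Int) ∧ (k : Int) < sp.2.1) := by omega
    simp [h1, this]
  · simp only [if_neg h1]
    by_cases h2 : (if sp.2.2 = "Ayah" then (1:Int) else if sp.2.2 = "Hadith" then 2 else 0) = 0
    · have : pvCode sp.2.2 = 0 := h2
      simp [h2, this]
    · have hc : pvCode sp.2.2 ≠ 0 := h2
      simp only [if_neg h2]
      rw [pvPaint_getElem? _ _ _ (by omega) arr k]
      have hiff : (max 0 sp.1 ≤ (k : Int) ∧ (k : Int) < min length sp.2.1) ↔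
          (sp.1 ≤ (k : Int) ∧ (k : Int) < sp.2.1) := by omega
      simp only [hiff]
      have : pvCode sp.2.2 = (if sp.2.2 = "Ayah" then (1:Int) else if sp.2.2 = "Hadith" then 2 else 0) := rfl
      split_ifs with h <;> simp_all [pvCode]

theorem pvLabel_cons (i : Int) (sp : Int × Int × String) (rest : List (Int × Int × String)) :
    pvLabel i (sp :: rest) =
      if (sp.1 ≤ i ∧ i < sp.2.1) ∧ pvCode sp.2.2 ≠ 0 then pvCode sp.2.2 else pvLabel i rest := by
  obtain ⟨s, e, t⟩ := sp
  simp only [pvLabel, pvCode]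
  split_ifs <;> simp_all

theorem foldl_stepA_getElem? (length : Int) (spans : List (Int × Int × String)) (arr : List Int)
    (k : Nat) (hN : arr.length = (max 0 length).toNat) (hk : k < arr.length) :
    (spans.foldl (pvStepA length) arr)[k]? =
      if pvLabel (k : Int) spans.reverse = 0 then arr[k]? else some (pvLabel (k : Int) spans.reverse) := by
  induction spans using List.reverseRecOn generalizing arr with
  | nil => simp [pvLabel]
  | append_singleton sps sp ih =>
    rw [List.foldl_append, List.foldl_cons, List.foldl_nil, List.reverse_append]
    have hlen : (sps.foldl (pvStepA length) arr).length = arr.length := foldl_stepA_length ..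
    rw [pvStepA_getElem? length _ sp k (by omega) (by omega)]
    simp only [List.reverse_singleton, List.singleton_append, pvLabel_cons]
    by_cases h : (sp.1 ≤ (k:Int) ∧ (k:Int) < sp.2.1) ∧ pvCode sp.2.2 ≠ 0
    · simp [h]
    · rw [if_neg h, if_neg h, ih arr hN hk]

-- ===== VERDICT (by name: the statement is the Claim_ definition above) =====
theorem build_char_labels_spec : Claim_equal_build_char_labels := by
  intro length spans _
  unfold Spec_build_char_labels build_char_labels build_char_labels_alt
  set N := (max 0 length).toNat with hNdef
  have hmax : (max 0 length) = (N : Int) := by omega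
  apply List.ext_getElem?
  intro k
  by_cases hk : k < N
  · rw [foldl_stepA_getElem? length spans _ k (by simpa using hNdef) (by simp [hk])]
    have hmap : ((PySem.List.pyRange 0 (max 0 length) 1).map
        (fun i => pvLabel i spans.reverse))[k]? = some (pvLabel (k : Int) spans.reverse) := by
      rw [hmax]
      exact PySem.List.getElem?_map_pyRange_zero _ _ _ hk
    rw [hmap, List.getElem?_replicate]
    split_ifs with h <;> simp_all
  · have h1 : (spans.foldl (pvStepA length) (List.replicate N 0)).length ≤ k := by
      rw [foldl_stepA_length]; simpa using Nat.le_of_not_lt hk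
    have h2 : ((PySem.List.pyRange 0 (max 0 length) 1).map
        (fun i => pvLabel i spans.reverse)).length ≤ k := by
      simp [PySem.List.length_pyRange_one]; omega
    rw [List.getElem?_eq_none h1, List.getElem?_eq_none h2]
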